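-- pv_equiv track=rewrite | github.com/biobakery/biobakery_workflows | biobakery_workflows/utilities.py | taxa_remove_unclassified
-- ===== SOURCE A (Python) =====
-- def taxa_remove_unclassified(taxa, delimiter=";"):
--     """ Rename the taxa to remove the unclassified levels
--
--         Args:
--             taxa (list): The list of taxa.
--             delimiter (str): The string delimiter (usually pipe or semi-colon).
--
--         Requires:
--             None
--
--         Returns:
--             (list): The list of taxa after removing the unclassified names.
--     """
--
--     # remove any levels where the name is unknown (ie empty)
--     for taxon in taxa:
--         new_name=[]
--         for level in taxon.replace(" ","").split(delimiter):
--             try: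
--                 rank, name = level.split("__")
--             except ValueError:
--                 # ignore identities like "unclassified" if present
--                 continue
--             if name:
--                 new_name.append(level)
--             else:
--                 break
--         yield delimiter.join(new_name)
-- ===== SOURCE B (Python) =====
-- def _parts(level):
--     return level.split("__")
--
-- def _terminal(level):
--     p = _parts(level)
--     return len(p) == 2 and p[1] == ""
--
-- def _classified(level):
--     p = _parts(level)
--     return len(p) == 2 and p[1] != ""
--
-- def taxa_remove_unclassified(taxa, delimiter=";"):
--     """Strip unclassified (empty-named) levels: for each taxon, find the first
--     level that is a valid rank__name pair with empty name (stop point), and keep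
--     the valid pairs with non-empty names from the prefix before it."""
--     for taxon in taxa:
--         levels = taxon.replace(" ", "").split(delimiter)
--         stop = next((i for i, lv in enumerate(levels) if _terminal(lv)), len(levels))
--         yield delimiter.join([lv for lv in levels[:stop] if _classified(lv)])
-- ===== Notes on version B (the rewrite author's own statement) =====
-- stated objective: idiomatic
-- what changed: Replaces A's single stateful loop mixing continue/break with a declarative pipeline per taxon: find the first empty-named valid level (next over enumerate), slice the prefix before it, and filter it with a comprehension keeping only valid non-empty-named levels.
import Mathlib
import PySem

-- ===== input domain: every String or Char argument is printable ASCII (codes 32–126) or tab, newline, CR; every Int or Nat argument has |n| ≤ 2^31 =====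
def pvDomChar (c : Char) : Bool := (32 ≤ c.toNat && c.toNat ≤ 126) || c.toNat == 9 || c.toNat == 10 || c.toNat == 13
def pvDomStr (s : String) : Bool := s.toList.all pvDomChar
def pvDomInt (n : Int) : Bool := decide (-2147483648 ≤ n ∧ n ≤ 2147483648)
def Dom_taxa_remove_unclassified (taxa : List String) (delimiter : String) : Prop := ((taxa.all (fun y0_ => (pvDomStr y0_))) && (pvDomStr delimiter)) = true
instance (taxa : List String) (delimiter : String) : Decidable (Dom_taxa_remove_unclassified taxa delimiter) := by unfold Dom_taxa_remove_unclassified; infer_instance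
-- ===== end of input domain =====

-- B restructures A's single break/continue loop per taxon into find-stop-index, take-prefix, filter (idiomatic; same cost).
-- Pre_ excludes only inputs where A raises (ValueError: empty separator): nonempty taxa with delimiter = "".


-- ===== PORT A =====
-- inner 'for level in …' loop with new_name accumulator; ValueError-unpack = splitOn length ≠ 2 → continue
def pvInnerA : List String → List String → List String
  | [], newName => newName
  | level :: rest, newName =>
    match (PySem.Str.split? level "__").getD [] with  -- "__" ≠ "": split? is always some here
    | [_, name] => if name ≠ "" then pvInnerA rest (newName ++ [level]) else newName
    | _ => pvInnerA rest newName

def taxa_remove_unclassified (taxa : List String) (delimiter : String) : List String :=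
  taxa.map (fun taxon =>
    -- split? is none only for delimiter = "", excluded by Pre_ (Python raises there); getD [] never observed
    PySem.Str.join delimiter
      (pvInnerA ((PySem.Str.split? (PySem.Str.replace taxon " " "") delimiter).getD []) []))

-- ===== PORT B =====
def pvParts (level : String) : List String := (PySem.Str.split? level "__").getD []

def pvTerminal (level : String) : Bool :=
  (pvParts level).length == 2 && (pvParts level).getD 1 "" == ""

def pvClassified (level : String) : Bool :=
  (pvParts level).length == 2 && !((pvParts level).getD 1 "" == "")

def taxa_remove_unclassified_alt (taxa : List String) (delimiter : String) : List String :=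
  taxa.map (fun taxon =>
    let levels := (PySem.Str.split? (PySem.Str.replace taxon " " "") delimiter).getD []
    -- next((i for i, lv in enumerate(levels) if _terminal(lv)), len(levels)) = findIdx
    let stop := levels.findIdx pvTerminal
    PySem.Str.join delimiter ((levels.take stop).filter pvClassified))

-- ===== PRECONDITION & SPEC =====
-- Pre_ excludes exactly the inputs where Python A raises ValueError ("empty separator"): a nonempty taxa list with delimiter = "".
def Pre_taxa_remove_unclassified (taxa : List String) (delimiter : String) : Prop :=
  taxa = [] ∨ delimiter ≠ ""
instance (taxa : List String) (delimiter : String) : Decidable (Pre_taxa_remove_unclassified taxa delimiter) := by unfold Pre_taxa_remove_unclassified; infer_instance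

def pvWitness_taxa_remove_unclassified : List String × String := (["k__Bacteria;p__"], ";")

def Spec_taxa_remove_unclassified (taxa : List String) (delimiter : String) (out : List String) : Prop := out = taxa_remove_unclassified_alt taxa delimiter
instance (taxa : List String) (delimiter : String) (out : List String) : Decidable (Spec_taxa_remove_unclassified taxa delimiter out) := by unfold Spec_taxa_remove_unclassified; infer_instance

-- ===== CLAIM (what is proved, stated in full; the proofs are below) =====
def Claim_equal_taxa_remove_unclassified : Prop := ∀ (taxa : List String) (delimiter : String), Dom_taxa_remove_unclassified taxa delimiter → Pre_taxa_remove_unclassified taxa delimiter → Spec_taxa_remove_unclassified taxa delimiter (taxa_remove_unclassified taxa delimiter)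

-- ===== LEMMAS AND PROOFS =====

-- A's inner loop equals B's take-then-filter, for any accumulator
theorem pvInnerA_eq (levels : List String) : ∀ acc : List String,
    pvInnerA levels acc = acc ++ (levels.take (levels.findIdx pvTerminal)).filter pvClassified := by
  induction levels with
  | nil => intro acc; simp [pvInnerA]
  | cons lv rest ih =>
    intro acc
    rcases h : (PySem.Str.split? lv "__").getD [] with _ | ⟨a, _ | ⟨b, _ | _⟩⟩ <;>
      simp [pvInnerA, h, List.findIdx_cons, pvTerminal, pvClassified, pvParts, ih]
    by_cases hb : b = ""
    · simp [hb]
    · have hbe : (b == "") = false := by simp [hb]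
      simp only [hbe, cond_false, List.take_succ_cons, List.filter_cons, pvClassified, pvParts, h]
      simp [hb]

theorem taxa_remove_unclassified_spec : Claim_equal_taxa_remove_unclassified := by
  intro taxa delimiter _ _
  unfold Spec_taxa_remove_unclassified taxa_remove_unclassified taxa_remove_unclassified_alt
  refine List.map_congr_left (fun taxon _ => ?_)
  simp [pvInnerA_eq]
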